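-- pv_equiv track=rewrite | github.com/md-ward/my-Kata-solutions- | Ce_s_r_d Strings.py | uncensor
-- ===== SOURCE A (Python) =====
-- def uncensor(infected, discovered):
--
--     newText = ''
--     count = -1
--     for i in infected:
--         if i == '*':
--             count += 1
--             newText += discovered[count]
--
--         else:
--             newText += i
--     return newText
-- ===== SOURCE B (Python) =====
-- def uncensor(infected, discovered):
--     parts = infected.split('*')
--     out = parts[0]
--     for ch, part in zip(discovered, parts[1:]):
--         out += ch + part
--     return out
-- ===== Notes on version B (the rewrite author's own statement) =====
-- stated objective: simpler
-- what changed: Replaces the per-character loop with a running counter by split('*') followed by a single zip(discovered, parts[1:]) interleave pass.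
import Mathlib
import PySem

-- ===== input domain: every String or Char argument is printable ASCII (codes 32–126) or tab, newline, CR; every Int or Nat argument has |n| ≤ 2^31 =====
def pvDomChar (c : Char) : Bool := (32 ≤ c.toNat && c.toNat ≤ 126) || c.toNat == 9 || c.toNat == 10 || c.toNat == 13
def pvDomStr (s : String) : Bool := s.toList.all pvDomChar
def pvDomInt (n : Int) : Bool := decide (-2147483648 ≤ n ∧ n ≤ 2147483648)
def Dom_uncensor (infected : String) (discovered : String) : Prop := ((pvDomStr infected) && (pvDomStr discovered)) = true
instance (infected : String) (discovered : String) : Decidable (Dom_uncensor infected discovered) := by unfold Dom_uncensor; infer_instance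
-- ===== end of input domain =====

-- B replaces A's per-character counter scan by split('*') followed by one zip/interleave pass (simpler decomposition, same cost).

-- ===== PORT A =====
-- per-character loop; 'discovered[count]' would raise IndexError when count ≥ len(discovered) —
-- those inputs are excluded by Pre_uncensor, so the '.getD' default is never reached there
def uncensorGo (disc : List Char) : List Char → List Char → Int → List Char
  | [], acc, _ => acc
  | c :: rest, acc, count =>
    if c = '*' then
      uncensorGo disc rest (acc ++ [(PySem.List.pyGet? disc (count + 1)).getD ' ']) (count + 1)
    else
      uncensorGo disc rest (acc ++ [c]) count

def uncensor (infected : String) (discovered : String) : String :=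
  String.ofList (uncensorGo discovered.toList infected.toList [] (-1))

-- ===== PORT B =====
-- Source B: parts = infected.split('*'); out = parts[0]; for ch, part in zip(discovered, parts[1:]): out += ch + part
-- Python's single-char str.split is exactly List.splitOn (it never returns an empty list, so parts[0] is total)
def uncensor_alt (infected : String) (discovered : String) : String :=
  let parts := infected.toList.splitOn '*'
  String.ofList ((List.zip discovered.toList parts.tail).foldl
    (fun out cp => out ++ cp.1 :: cp.2) (parts.headD []))

-- ===== PRECONDITION & SPEC =====
-- Pre_ excludes exactly the inputs where A raises IndexError: more '*' in infected than characters in discovered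
def Pre_uncensor (infected : String) (discovered : String) : Prop :=
  infected.toList.count '*' ≤ discovered.toList.length
instance (infected : String) (discovered : String) : Decidable (Pre_uncensor infected discovered) := by
  unfold Pre_uncensor; infer_instance
def pvWitness_uncensor : String × String := ("a*b*c", "xy")

def Spec_uncensor (infected : String) (discovered : String) (out : String) : Prop := out = uncensor_alt infected discovered
instance (infected : String) (discovered : String) (out : String) : Decidable (Spec_uncensor infected discovered out) := by unfold Spec_uncensor; infer_instance

-- ===== CLAIM (what is proved, stated in full; the proofs are below) =====
def Claim_equal_uncensor : Prop := ∀ (infected : String) (discovered : String), Dom_uncensor infected discovered → Pre_uncensor infected discovered → Spec_uncensor infected discovered (uncensor infected discovered)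

-- ===== LEMMAS AND PROOFS =====

-- the interleaved tail: discovered[k], parts[1], discovered[k+1], parts[2], …
def tailGo (disc : List Char) : List (List Char) → Nat → List Char
  | [], _ => []
  | p :: ps, k => (disc[k]?.getD ' ') :: p ++ tailGo disc ps (k + 1)

lemma splitOn_cons_char (c : Char) (l : List Char) :
    List.splitOn '*' (c :: l) =
      if '*' = c then [] :: List.splitOn '*' l else (List.splitOn '*' l).modifyHead (c :: ·) := by
  simp [List.splitOn, List.splitOnP_cons]; split <;> simp_all [eq_comm]

lemma splitOn_char_ne_nil (l : List Char) : List.splitOn '*' l ≠ [] := by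
  simp [List.splitOn]; exact List.splitOnP_ne_nil _ l

lemma length_splitOn_char (l : List Char) :
    (List.splitOn '*' l).length = l.count '*' + 1 := by
  induction l with
  | nil => simp
  | cons c rest ih =>
    rw [splitOn_cons_char]
    split <;> simp_all [eq_comm]

lemma zipfold (disc : List Char) :
    ∀ (ps : List (List Char)) (k : Nat) (a : List Char), k + ps.length ≤ disc.length →
      (List.zip (disc.drop k) ps).foldl (fun out cp => out ++ cp.1 :: cp.2) a
        = a ++ tailGo disc ps k := by
  intro ps
  induction ps with
  | nil => intro k a _; simp [tailGo]
  | cons p ps ih =>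
    intro k a h
    have hk : k < disc.length := by simp at h; omega
    rw [List.drop_eq_getElem_cons hk]
    simp only [List.zip_cons_cons, List.foldl_cons]
    rw [ih (k + 1) _ (by simp at h ⊢; omega)]
    simp [tailGo, List.getElem?_eq_getElem hk]

lemma uncensorGo_split (disc : List Char) :
    ∀ (cs : List Char) (k : Nat) (acc : List Char), k + cs.count '*' ≤ disc.length →
      uncensorGo disc cs acc ((k : Int) - 1)
        = acc ++ ((List.splitOn '*' cs).headD []) ++ tailGo disc (List.splitOn '*' cs).tail k := by
  intro cs
  induction cs with
  | nil => intro k acc _; simp [uncensorGo, tailGo]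
  | cons c rest ih =>
    intro k acc h
    obtain ⟨p, ps, hps⟩ := List.exists_cons_of_ne_nil (splitOn_char_ne_nil rest)
    by_cases hc : c = '*'
    · have h' : (k + 1) + rest.count '*' ≤ disc.length := by
        simp [hc] at h; omega
      have hk : k < disc.length := by omega
      simp only [uncensorGo, hc]
      have harg : (k : Int) - 1 + 1 = ((k + 1 : Nat) : Int) - 1 := by push_cast; ring
      rw [harg, ih (k + 1) _ h']
      rw [splitOn_cons_char]
      simp [hps, tailGo, PySem.List.pyGet?, PySem.List.pyIdx?,
        List.getElem?_eq_getElem hk]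
      simp [hk]
    · have h' : k + rest.count '*' ≤ disc.length := by
        simp [hc] at h ⊢; omega
      simp only [uncensorGo, if_neg hc]
      rw [ih k _ h']
      rw [splitOn_cons_char]
      simp [hps, Ne.symm hc]

-- ===== VERDICT (by name: the statement is the Claim_ definition above) =====
theorem uncensor_spec : Claim_equal_uncensor := by
  intro infected discovered _ hpre
  unfold Spec_uncensor uncensor uncensor_alt
  obtain ⟨p, ps, hps⟩ := List.exists_cons_of_ne_nil (splitOn_char_ne_nil infected.toList)
  have hA := uncensorGo_split discovered.toList infected.toList 0 []
    (by simpa using hpre)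
  have hlen : ps.length ≤ discovered.toList.length := by
    have := length_splitOn_char infected.toList
    rw [hps] at this
    simp at this
    unfold Pre_uncensor at hpre
    omega
  have hB := zipfold discovered.toList ps 0 p (by simpa using hlen)
  simp only at hA
  norm_num at hA
  rw [hA, hps]
  simp only [List.headD_cons, List.tail_cons]
  simp only [List.drop_zero] at hB
  rw [hB]
  simp
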